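-- pv_equiv track=rewrite | github.com/n4dirp/Render-Commander | render_commander/utils/helpers.py | format_frame_range
-- ===== SOURCE A (Python) =====
-- def format_frame_range(frames_list: list) -> str:
--     """Format a list of frame numbers into a compact range string."""
--     if not frames_list:
--         return "[]"
--
--     # Ensure sorting and uniqueness
--     sorted_frames = sorted(set(map(int, frames_list)))
--
--     ranges = []
--     start = end = sorted_frames[0]
--
--     for num in sorted_frames[1:]:
--         if num == end + 1:
--             end = num
--         else:
--             ranges.append((start, end))
--             start = end = num
--         end = num
--     ranges.append((start, end))  # Add the last range
--
--     formatted_ranges = []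
--     for r in ranges:
--         if r[0] == r[1]:
--             formatted_ranges.append(f"{r[0]}")
--         else:
--             formatted_ranges.append(f"{r[0]}-{r[1]}")
--
--     return f"[{', '.join(formatted_ranges)}]"
-- ===== SOURCE B (Python) =====
-- def format_frame_range(frames_list: list) -> str:
--     """Format a list of frame numbers into a compact range string."""
--     s = sorted(set(map(int, frames_list)))
--     if not s:
--         return "[]"
--     breaks = [p for p in zip(s, s[1:]) if p[1] != p[0] + 1]
--     starts = [s[0]] + [b for a, b in breaks]
--     ends = [a for a, b in breaks] + [s[-1]]
--     parts = [f"{a}" if a == b else f"{a}-{b}" for a, b in zip(starts, ends)]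
--     return f"[{', '.join(parts)}]"
-- ===== Notes on version B (the rewrite author's own statement) =====
-- stated objective: simpler
-- what changed: Replaced A's explicit (ranges, start, end) state machine over the sorted frames by a declarative computation: zip the sorted list with its tail to find break pairs, read run starts and ends off those breaks, and zip them into range parts.
import Mathlib
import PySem

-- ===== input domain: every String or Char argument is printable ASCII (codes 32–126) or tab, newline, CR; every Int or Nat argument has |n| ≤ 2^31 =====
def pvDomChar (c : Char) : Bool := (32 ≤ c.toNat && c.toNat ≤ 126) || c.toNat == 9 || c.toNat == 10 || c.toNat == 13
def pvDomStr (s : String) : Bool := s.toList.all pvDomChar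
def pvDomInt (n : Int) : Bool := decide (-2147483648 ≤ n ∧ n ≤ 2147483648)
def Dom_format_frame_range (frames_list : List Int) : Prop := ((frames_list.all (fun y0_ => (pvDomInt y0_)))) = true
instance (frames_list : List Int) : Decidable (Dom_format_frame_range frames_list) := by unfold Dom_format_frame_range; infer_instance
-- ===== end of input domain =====

-- B replaces A's explicit start/end state machine by a zip-based computation of run
-- boundaries (break pairs of consecutive sorted values); objective: simpler/idiomatic.

-- ===== PORT A =====
def format_frame_range (frames_list : List Int) : String :=
  if frames_list = [] then "[]"
  else
    let sorted_frames := PySem.List.sorted (PySem.Set.ofList (frames_list.map (fun x => x))) (fun x => x) false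
    -- start = end = sorted_frames[0]
    let start0 := PySem.List.pyGetD sorted_frames 0 0
    -- for num in sorted_frames[1:]: …  (state = (ranges, start, end); 'end = num' runs in both branches)
    let st := (PySem.List.slice sorted_frames (some 1) none).foldl
      (fun (s : List (Int × Int) × Int × Int) num =>
        if num = s.2.2 + 1 then (s.1, s.2.1, num)
        else (s.1 ++ [(s.2.1, s.2.2)], num, num))
      ([], start0, start0)
    let ranges := st.1 ++ [(st.2.1, st.2.2)]
    let formatted_ranges := ranges.foldl (fun acc r =>
      acc ++ [if r.1 = r.2 then PySem.Int.toStr r.1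
              else PySem.Int.toStr r.1 ++ "-" ++ PySem.Int.toStr r.2]) []
    "[" ++ PySem.Str.join ", " formatted_ranges ++ "]"

-- ===== PORT B =====
def format_frame_range_alt (frames_list : List Int) : String :=
  let s := PySem.List.sorted (PySem.Set.ofList (frames_list.map (fun x => x))) (fun x => x) false
  match s with
  | [] => "[]"
  | h :: t =>
    let breaks := (List.zip (h :: t) (PySem.List.slice (h :: t) (some 1) none)).filter
      (fun p => p.2 != p.1 + 1)
    let starts := h :: breaks.map Prod.snd
    let ends := breaks.map Prod.fst ++ [PySem.List.pyGetD (h :: t) (-1) 0]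
    let parts := (List.zip starts ends).map (fun p =>
      if p.1 = p.2 then PySem.Int.toStr p.1
      else PySem.Int.toStr p.1 ++ "-" ++ PySem.Int.toStr p.2)
    "[" ++ PySem.Str.join ", " parts ++ "]"

-- ===== PRECONDITION & SPEC =====
def Spec_format_frame_range (frames_list : List Int) (out : String) : Prop := out = format_frame_range_alt frames_list
instance (frames_list : List Int) (out : String) : Decidable (Spec_format_frame_range frames_list out) := by unfold Spec_format_frame_range; infer_instance

-- ===== CLAIM (what is proved, stated in full; the proofs are below) =====
def Claim_equal_format_frame_range : Prop := ∀ (frames_list : List Int), Dom_format_frame_range frames_list → Spec_format_frame_range frames_list (format_frame_range frames_list)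

-- ===== LEMMAS AND PROOFS =====

-- Proof-side characterisation of the list of runs of a sorted list e :: t,
-- with current run started at st and last seen element e.
def zipRanges : Int → Int → List Int → List (Int × Int)
  | st, e, [] => [(st, e)]
  | st, e, x :: xs => if x = e + 1 then zipRanges st x xs else (st, e) :: zipRanges x x xs

-- A's fold produces zipRanges
theorem foldA_eq_zipRanges : ∀ (t : List Int) (st e : Int) (R0 : List (Int × Int)),
    (let r := t.foldl
      (fun (s : List (Int × Int) × Int × Int) num =>
        if num = s.2.2 + 1 then (s.1, s.2.1, num)
        else (s.1 ++ [(s.2.1, s.2.2)], num, num))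
      (R0, st, e);
     r.1 ++ [(r.2.1, r.2.2)]) = R0 ++ zipRanges st e t := by
  intro t
  induction t with
  | nil => intro st e R0; simp [zipRanges]
  | cons x xs ih =>
    intro st e R0
    simp only [List.foldl_cons, zipRanges]
    by_cases h : x = e + 1
    · simp [h, ih]
    · simp [h, ih, List.append_assoc]

-- B's zip of starts and ends produces zipRanges
theorem zipB_eq_zipRanges : ∀ (t : List Int) (st e : Int) (hne : e :: t ≠ []),
    List.zip (st :: (((List.zip (e :: t) t).filter (fun p => p.2 != p.1 + 1)).map Prod.snd))
             ((((List.zip (e :: t) t).filter (fun p => p.2 != p.1 + 1)).map Prod.fst)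
               ++ [(e :: t).getLast hne]) = zipRanges st e t := by
  intro t
  induction t with
  | nil => intro st e _; simp [zipRanges]
  | cons x xs ih =>
    intro st e _
    have hlast : (e :: x :: xs).getLast (by simp) = (x :: xs).getLast (by simp) :=
      List.getLast_cons (by simp)
    rw [List.zip_cons_cons, zipRanges]
    by_cases h : x = e + 1
    · rw [if_pos h]
      have hf : (x != e + 1) = false := by simp [h]
      simp only [List.filter_cons, hf, Bool.false_eq_true, if_false, hlast]
      exact ih st x (by simp)
    · rw [if_neg h]
      have hf : (x != e + 1) = true := by simp [h]
      simp only [List.filter_cons, hf, if_true, List.map_cons, List.cons_append, hlast]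
      rw [List.zip_cons_cons]
      exact congrArg _ (ih x x (by simp))

theorem sorted_set_ne_nil {l : List Int} (h : l ≠ []) :
    PySem.List.sorted (PySem.Set.ofList (l.map (fun x => x))) (fun x => x) false ≠ [] := by
  intro hs
  rw [PySem.List.sorted_eq_nil_iff] at hs
  match l, h with
  | y :: ys, _ =>
    have : y ∈ PySem.Set.ofList ((y :: ys).map (fun x => x)) := by
      rw [PySem.Set.mem_ofList]; simp
    rw [hs] at this
    exact absurd this (List.not_mem_nil)

-- ===== VERDICT (by name: the statement is the Claim_ definition above) =====
theorem format_frame_range_spec : Claim_equal_format_frame_range := by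
  intro frames_list _
  unfold Spec_format_frame_range format_frame_range format_frame_range_alt
  by_cases hnil : frames_list = []
  · subst hnil; rfl
  · rw [if_neg hnil]
    have hs := sorted_set_ne_nil hnil
    match hS : PySem.List.sorted (PySem.Set.ofList (frames_list.map (fun x => x))) (fun x => x) false, hs with
    | h :: t, _ =>
      simp only [PySem.List.slice_from_one, List.tail_cons, PySem.List.pyGetD_zero_cons]
      rw [PySem.List.pyGetD_neg_one (h :: t) 0 (by simp)]
      rw [foldA_eq_zipRanges t h h [], List.nil_append,
        PySem.List.foldl_append_singleton_eq_map,
        ← zipB_eq_zipRanges t h h (by simp)]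
      simp
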